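-- pv_equiv track=rewrite | github.com/Uber-Career-Prep-2023/Uber-Career-Prep-Homework-Keshav-Shah | Assignment-3/VacationDestinations.py | vacation_destinations
-- ===== SOURCE A (Python) =====
-- from collections import defaultdict, deque
--
-- def vacation_destinations(destinations, origin, k):
--     adj_list = defaultdict(list)
--     output = []
--     for c1, c2, time in destinations:
--         adj_list[c1].append((c2, time))
--         adj_list[c2].append((c1, time))
--
--     q = deque([(origin, -1)])
--     visited = {origin}
--     while q:
--         curr_city, time = q.popleft()
--
--         if time <= k and time != -1:
--             output.append(curr_city)
--
--         for nbr, next_time in adj_list[curr_city]: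
--             if nbr not in visited:
--                 q.append((nbr, time+next_time+1))
--                 visited.add(nbr)
--
--     return len(output)
-- ===== SOURCE B (Python) =====
-- def vacation_destinations(destinations, origin, k):
--     # Frontier-as-dict BFS: no queue, no visited set, no output list. Each round
--     # discovers the next wave into a fresh dict (first write wins, like A's
--     # visited marking), accumulates every city's discovery time in `times`,
--     # and the answer is one counting pass over times.values() at the end.
--     adj = {}
--     for a, b, t in destinations:
--         adj.setdefault(a, []).append((b, t))
--         adj.setdefault(b, []).append((a, t))
--
--     times = {origin: -1}
--     level = {origin: -1}
--     while level:
--         found = {}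
--         for city, t in level.items():
--             for nbr, w in adj.get(city, []):
--                 if nbr not in times and nbr not in found:
--                     found[nbr] = t + w + 1
--         times.update(found)
--         level = found
--     return sum(1 for t in times.values() if t != -1 and t <= k)
-- ===== Notes on version B (the rewrite author's own statement) =====
-- stated objective: alternative
-- what changed: Replaces A's deque+visited-set+output-list BFS with a frontier-as-dict BFS: each round writes newly discovered cities and their times into a fresh dict (first write wins, playing the role of A's visited marking), merges it into an accumulating times dict, and the answer is a single counting pass over times.values() at the end — no queue, no visited set, no output list.
import Mathlib
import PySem

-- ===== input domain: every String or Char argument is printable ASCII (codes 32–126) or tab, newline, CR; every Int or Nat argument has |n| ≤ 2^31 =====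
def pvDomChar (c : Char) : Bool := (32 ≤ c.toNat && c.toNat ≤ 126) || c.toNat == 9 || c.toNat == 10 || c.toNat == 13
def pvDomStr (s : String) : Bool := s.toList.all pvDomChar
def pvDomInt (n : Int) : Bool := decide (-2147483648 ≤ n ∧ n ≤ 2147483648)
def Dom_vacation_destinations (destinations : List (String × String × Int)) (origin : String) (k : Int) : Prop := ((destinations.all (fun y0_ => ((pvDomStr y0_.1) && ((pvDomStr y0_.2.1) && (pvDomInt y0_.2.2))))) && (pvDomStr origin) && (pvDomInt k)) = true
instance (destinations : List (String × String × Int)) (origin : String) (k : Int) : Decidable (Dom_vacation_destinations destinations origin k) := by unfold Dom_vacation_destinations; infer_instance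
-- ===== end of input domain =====

-- B replaces A's deque/visited-set/output-list BFS by a frontier-as-dict BFS that
-- accumulates every discovery time in a dict and counts in one final pass (objective: alternative).

-- ===== PORT A =====
-- adjacency building: defaultdict(list) with append = insert key with old-value-or-[] ++ [pair]
def pvBuildAdjA (destinations : List (String × String × Int)) : PySem.Dict String (List (String × Int)) :=
  destinations.foldl (fun d p =>
    let d1 := d.insert p.1 (d.getD p.1 [] ++ [(p.2.1, p.2.2)])
    d1.insert p.2.1 (d1.getD p.2.1 [] ++ [(p.1, p.2.2)])) PySem.Dict.empty

-- A's inner neighbour loop: append unvisited neighbours to the queue, mark visited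
def pvPushA (t : Int) (st : List (String × Int) × PySem.Set String) (nbrs : List (String × Int)) :
    List (String × Int) × PySem.Set String :=
  nbrs.foldl (fun st nw =>
    if nw.1 ∈ st.2 then st
    else (st.1 ++ [(nw.1, t + nw.2 + 1)], PySem.Set.add st.2 nw.1)) st

-- termination measure helpers: nodes occurring in adjacency values, and how many are unvisited
def pvUniv (adj : PySem.Dict String (List (String × Int))) : List String :=
  adj.values.flatten.map Prod.fst

def pvCnt (adj : PySem.Dict String (List (String × Int))) (vis : PySem.Set String) : Nat :=
  ((pvUniv adj).filter (fun x => decide (x ∉ vis))).length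

-- (termination lemmas for the ports; cited by decreasing_by)
theorem pv_filter_mono {α : Type} (p q : α → Bool) (h : ∀ x, p x = true → q x = true) (L : List α) :
    (L.filter p).length ≤ (L.filter q).length := by
  induction L with
  | nil => simp
  | cons a L ih =>
    cases hpa : p a with
    | false =>
      cases hqa : q a <;> simp [hpa, hqa] <;> omega
    | true =>
      have hqa := h a hpa
      simp [hpa, hqa]; omega

theorem pv_filter_strict {α : Type} (p q : α → Bool) (h : ∀ x, p x = true → q x = true)
    (L : List α) (n : α) (hn : n ∈ L) (hpn : p n = false) (hqn : q n = true) :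
    (L.filter p).length < (L.filter q).length := by
  induction L with
  | nil => cases hn
  | cons a L ih =>
    rcases List.mem_cons.mp hn with rfl | hmem
    · have hle := pv_filter_mono p q h L
      simp [hpn, hqn]; omega
    · have hlt := ih hmem
      cases hpa : p a with
      | false => cases hqa : q a <;> simp [hpa, hqa] <;> omega
      | true =>
        have hqa := h a hpa
        simp [hpa, hqa]; omega

theorem pvCnt_add_lt (adj : PySem.Dict String (List (String × Int))) (vis : PySem.Set String)
    (n : String) (hn : n ∈ pvUniv adj) (hnv : n ∉ vis) :
    pvCnt adj (PySem.Set.add vis n) < pvCnt adj vis := by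
  apply pv_filter_strict
  · intro x hx
    simp only [decide_eq_true_eq] at hx ⊢
    intro hxv
    exact hx ((PySem.Set.mem_add _ _ _).mpr (Or.inl hxv))
  · exact hn
  · simp [PySem.Set.mem_add]
  · simpa using hnv

theorem pv_getD_mem_univ (adj : PySem.Dict String (List (String × Int))) (c : String)
    (p : String × Int) (hp : p ∈ adj.getD c []) : p.1 ∈ pvUniv adj := by
  rw [PySem.Dict.getD_eq_get?_getD] at hp
  cases h : adj.get? c with
  | none => rw [h] at hp; cases hp
  | some v =>
    rw [h] at hp
    have hi : (c, v) ∈ adj.items := PySem.Dict.mem_items_of_get?_eq_some adj h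
    have hv : v ∈ adj.values := by
      simp only [PySem.Dict.values]
      exact List.mem_map.mpr ⟨(c, v), hi, rfl⟩
    exact List.mem_map.mpr ⟨p, List.mem_flatten.mpr ⟨v, hv, hp⟩, rfl⟩

theorem pvPush_measure (adj : PySem.Dict String (List (String × Int))) (t : Int) :
    ∀ (nbrs : List (String × Int)), (∀ p ∈ nbrs, p.1 ∈ pvUniv adj) →
    ∀ (q : List (String × Int)) (vis : PySem.Set String),
      2 * pvCnt adj (pvPushA t (q, vis) nbrs).2 + (pvPushA t (q, vis) nbrs).1.length ≤
        2 * pvCnt adj vis + q.length := by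
  intro nbrs
  induction nbrs with
  | nil => intro _ q vis; simp [pvPushA]
  | cons nw nbrs ih =>
    intro hnb q vis
    have hstep : pvPushA t (q, vis) (nw :: nbrs) =
        pvPushA t (if nw.1 ∈ vis then (q, vis)
                   else (q ++ [(nw.1, t + nw.2 + 1)], PySem.Set.add vis nw.1)) nbrs := by
      simp only [pvPushA, List.foldl_cons]
    by_cases hmem : nw.1 ∈ vis
    · rw [hstep]; simp only [hmem, if_pos]
      exact ih (fun p hp => hnb p (List.mem_cons_of_mem _ hp)) q vis
    · rw [hstep]; simp only [hmem, if_neg, not_false_iff]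
      have h1 := ih (fun p hp => hnb p (List.mem_cons_of_mem _ hp))
        (q ++ [(nw.1, t + nw.2 + 1)]) (PySem.Set.add vis nw.1)
      have h2 := pvCnt_add_lt adj vis nw.1 (hnb nw (List.mem_cons_self)) hmem
      simp only [List.length_append, List.length_cons, List.length_nil] at h1 ⊢
      omega

def pvLoopA (adj : PySem.Dict String (List (String × Int))) (k : Int)
    (q : List (String × Int)) (vis : PySem.Set String) (out : List String) : List String :=
  match q with
  | [] => out
  | ct :: rest =>
    let out' := if ct.2 ≤ k ∧ ct.2 ≠ -1 then out ++ [ct.1] else out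
    let st := pvPushA ct.2 (rest, vis) (adj.getD ct.1 [])
    pvLoopA adj k st.1 st.2 out'
termination_by 2 * pvCnt adj vis + q.length
decreasing_by
  have h := pvPush_measure adj ct.2 (adj.getD ct.1 [])
    (fun p hp => pv_getD_mem_univ adj ct.1 p hp) rest vis
  simp only [List.length_cons]
  omega

def vacation_destinations (destinations : List (String × String × Int)) (origin : String) (k : Int) : Int :=
  let adj := pvBuildAdjA destinations
  ((pvLoopA adj k [(origin, -1)] (PySem.Set.ofList [origin]) []).length : Int)

-- ===== PORT B =====
-- adjacency building: setdefault(c, []).append(pair) = insert key with old-value-or-[] ++ [pair]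
def pvBuildAdjB (destinations : List (String × String × Int)) : PySem.Dict String (List (String × Int)) :=
  destinations.foldl (fun d p =>
    let d1 := d.insert p.1 (d.getD p.1 [] ++ [(p.2.1, p.2.2)])
    d1.insert p.2.1 (d1.getD p.2.1 [] ++ [(p.1, p.2.2)])) PySem.Dict.empty

-- B's inner neighbour loop: first write into the round's discovery dict wins
def pvInnerB (times : PySem.Dict String Int) (t : Int) (f : PySem.Dict String Int)
    (nbrs : List (String × Int)) : PySem.Dict String Int :=
  nbrs.foldl (fun f nw =>
    if times.contains nw.1 || f.contains nw.1 then f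
    else f.insert nw.1 (t + nw.2 + 1)) f

-- one round: build this level's discovery dict `found` from the frontier pairs
def pvLevelB (adj : PySem.Dict String (List (String × Int))) (times : PySem.Dict String Int)
    (lpairs : List (String × Int)) : PySem.Dict String Int :=
  lpairs.foldl (fun f ct => pvInnerB times ct.2 f (adj.getD ct.1 [])) PySem.Dict.empty

-- termination measure for B: nodes of the adjacency not yet in `times`
def pvCntN (adj : PySem.Dict String (List (String × Int))) (times : PySem.Dict String Int) : Nat :=
  ((pvUniv adj).filter (fun x => !times.contains x)).length

-- (termination lemmas for pvLoopB; cited by decreasing_by)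
theorem pvInner_inv (adj : PySem.Dict String (List (String × Int))) (times : PySem.Dict String Int) (t : Int) :
    ∀ (nbrs : List (String × Int)) (f : PySem.Dict String Int),
      (∀ p ∈ nbrs, p.1 ∈ pvUniv adj) →
      ((∀ p ∈ f.items, p.1 ∈ pvUniv adj ∧ times.contains p.1 = false) ∧ f.keys.Nodup) →
      ((∀ p ∈ (pvInnerB times t f nbrs).items, p.1 ∈ pvUniv adj ∧ times.contains p.1 = false) ∧
        (pvInnerB times t f nbrs).keys.Nodup) := by
  intro nbrs
  induction nbrs with
  | nil => intro f _ hf; exact hf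
  | cons nw nbrs ih =>
    intro f hnb hf
    have hstep : pvInnerB times t f (nw :: nbrs) =
        pvInnerB times t (if times.contains nw.1 || f.contains nw.1 then f
                          else f.insert nw.1 (t + nw.2 + 1)) nbrs := by
      simp only [pvInnerB, List.foldl_cons]
    by_cases hc : (times.contains nw.1 || f.contains nw.1) = true
    · rw [hstep, if_pos hc]
      exact ih f (fun p hp => hnb p (List.mem_cons_of_mem _ hp)) hf
    · rw [hstep, if_neg hc]
      have hts : times.contains nw.1 = false := by
        cases h1 : times.contains nw.1 <;> simp [h1] at hc ⊢
      have hfs : f.contains nw.1 = false := by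
        cases h1 : f.contains nw.1 <;> simp [h1] at hc ⊢
      apply ih _ (fun p hp => hnb p (List.mem_cons_of_mem _ hp))
      constructor
      · intro p hp
        rw [PySem.Dict.items_insert_of_not_contains f _ hfs] at hp
        rcases List.mem_append.mp hp with h | h
        · exact hf.1 p h
        · have : p = (nw.1, t + nw.2 + 1) := by simpa using h
          subst this
          exact ⟨hnb nw (List.mem_cons_self), hts⟩
      · exact PySem.Dict.nodup_keys_insert f _ _ hf.2

theorem pvLevel_inv (adj : PySem.Dict String (List (String × Int))) (times : PySem.Dict String Int) :
    ∀ (lpairs : List (String × Int)) (f : PySem.Dict String Int),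
      ((∀ p ∈ f.items, p.1 ∈ pvUniv adj ∧ times.contains p.1 = false) ∧ f.keys.Nodup) →
      ((∀ p ∈ (lpairs.foldl (fun f ct => pvInnerB times ct.2 f (adj.getD ct.1 [])) f).items,
          p.1 ∈ pvUniv adj ∧ times.contains p.1 = false) ∧
        (lpairs.foldl (fun f ct => pvInnerB times ct.2 f (adj.getD ct.1 [])) f).keys.Nodup) := by
  intro lpairs
  induction lpairs with
  | nil => intro f hf; exact hf
  | cons ct lpairs ih =>
    intro f hf
    simp only [List.foldl_cons]
    exact ih _ (pvInner_inv adj times ct.2 _ f (fun p hp => pv_getD_mem_univ adj ct.1 p hp) hf)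

theorem pvFound_inv (adj : PySem.Dict String (List (String × Int))) (times : PySem.Dict String Int)
    (lpairs : List (String × Int)) :
    ((∀ p ∈ (pvLevelB adj times lpairs).items, p.1 ∈ pvUniv adj ∧ times.contains p.1 = false) ∧
      (pvLevelB adj times lpairs).keys.Nodup) := by
  apply pvLevel_inv
  constructor
  · intro p hp; cases hp
  · exact List.nodup_nil

theorem pvUpd_measure (adj : PySem.Dict String (List (String × Int))) :
    ∀ (ps : List (String × Int)) (times : PySem.Dict String Int),
      (∀ p ∈ ps, p.1 ∈ pvUniv adj ∧ times.contains p.1 = false) →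
      (ps.map Prod.fst).Nodup →
      pvCntN adj (times.update ps) + ps.length ≤ pvCntN adj times := by
  intro ps
  induction ps with
  | nil => intro times _ _; simp [PySem.Dict.update]
  | cons p ps ih =>
    intro times hps hnd
    have hstep : times.update (p :: ps) = (times.insert p.1 p.2).update ps := by
      simp only [PySem.Dict.update, List.foldl_cons]
    rw [hstep]
    have hnd' : (ps.map Prod.fst).Nodup := (List.nodup_cons.mp hnd).2
    have hpn : p.1 ∉ ps.map Prod.fst := (List.nodup_cons.mp hnd).1
    have hps' : ∀ q ∈ ps, q.1 ∈ pvUniv adj ∧ (times.insert p.1 p.2).contains q.1 = false := by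
      intro q hq
      refine ⟨(hps q (List.mem_cons_of_mem _ hq)).1, ?_⟩
      rw [PySem.Dict.contains_insert]
      have hne : q.1 ≠ p.1 := by
        intro h; exact hpn (h ▸ List.mem_map.mpr ⟨q, hq, rfl⟩)
      simp [hne, (hps q (List.mem_cons_of_mem _ hq)).2]
    have h1 := ih (times.insert p.1 p.2) hps' hnd'
    have h2 : pvCntN adj (times.insert p.1 p.2) < pvCntN adj times := by
      apply pv_filter_strict
      · intro x hx
        rw [PySem.Dict.contains_insert] at hx
        cases h : times.contains x
        · rfl
        · simp [h] at hx
      · exact (hps p (List.mem_cons_self)).1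
      · simp [PySem.Dict.contains_insert_self]
      · simp [(hps p (List.mem_cons_self)).2]
    simp only [List.length_cons]
    omega

def pvLoopB (adj : PySem.Dict String (List (String × Int)))
    (times level : PySem.Dict String Int) : PySem.Dict String Int :=
  if level.items.isEmpty then times
  else
    let found := pvLevelB adj times level.items
    pvLoopB adj (times.update found.items) found
termination_by 2 * pvCntN adj times + level.items.length
decreasing_by
  have hinv := pvFound_inv adj times level.items
  have hkeys : ((pvLevelB adj times level.items).items.map Prod.fst).Nodup := by
    have := hinv.2
    simpa [PySem.Dict.keys] using this
  have hm := pvUpd_measure adj (pvLevelB adj times level.items).items times hinv.1 hkeys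
  have hne : level.items ≠ [] := by
    intro h; simp [h] at *
  have hlen : 1 ≤ level.items.length := by
    cases h : level.items with
    | nil => exact absurd h hne
    | cons a l => simp
  omega

def vacation_destinations_alt (destinations : List (String × String × Int)) (origin : String) (k : Int) : Int :=
  let adj := pvBuildAdjB destinations
  let times := pvLoopB adj (PySem.Dict.ofList [(origin, -1)]) (PySem.Dict.ofList [(origin, -1)])
  ((times.values.filter (fun t => decide (t ≠ -1 ∧ t ≤ k))).length : Int)

-- ===== PRECONDITION & SPEC =====
def Spec_vacation_destinations (destinations : List (String × String × Int)) (origin : String) (k : Int) (out : Int) : Prop := out = vacation_destinations_alt destinations origin k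
instance (destinations : List (String × String × Int)) (origin : String) (k : Int) (out : Int) : Decidable (Spec_vacation_destinations destinations origin k out) := by unfold Spec_vacation_destinations; infer_instance

-- ===== CLAIM (what is proved, stated in full; the proofs are below) =====
def Claim_equal_vacation_destinations : Prop := ∀ (destinations : List (String × String × Int)) (origin : String) (k : Int), Dom_vacation_destinations destinations origin k → Spec_vacation_destinations destinations origin k (vacation_destinations destinations origin k)

-- ===== LEMMAS AND PROOFS =====

def pvCountD (k : Int) (vals : List Int) : Nat :=
  (vals.filter (fun t => decide (t ≠ -1 ∧ t ≤ k))).length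

-- A's per-city step, reshaped as a level fold (proof device)
def pvStepA (adj : PySem.Dict String (List (String × Int))) (k : Int)
    (st : List (String × Int) × PySem.Set String × List String) (ct : String × Int) :
    List (String × Int) × PySem.Set String × List String :=
  let out' := if ct.2 ≤ k ∧ ct.2 ≠ -1 then st.2.2 ++ [ct.1] else st.2.2
  let p := pvPushA ct.2 (st.1, st.2.1) (adj.getD ct.1 [])
  (p.1, p.2, out')

theorem pvPush_shift (t : Int) :
    ∀ (nbrs : List (String × Int)) (a q : List (String × Int)) (vis : PySem.Set String),
      pvPushA t (a ++ q, vis) nbrs =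
        (a ++ (pvPushA t (q, vis) nbrs).1, (pvPushA t (q, vis) nbrs).2) := by
  intro nbrs
  induction nbrs with
  | nil => intro a q vis; simp [pvPushA]
  | cons nw nbrs ih =>
    intro a q vis
    by_cases hmem : nw.1 ∈ vis
    · simp only [pvPushA, List.foldl_cons, hmem, if_pos]
      exact ih a q vis
    · simp only [pvPushA, List.foldl_cons, hmem, if_neg, not_false_iff]
      have := ih a (q ++ [(nw.1, t + nw.2 + 1)]) (PySem.Set.add vis nw.1)
      simpa [List.append_assoc] using this

theorem pvLevelA (adj : PySem.Dict String (List (String × Int))) (k : Int) :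
    ∀ (f nxt : List (String × Int)) (vis : PySem.Set String) (out : List String),
      pvLoopA adj k (f ++ nxt) vis out =
        pvLoopA adj k (f.foldl (pvStepA adj k) (nxt, vis, out)).1
          (f.foldl (pvStepA adj k) (nxt, vis, out)).2.1
          (f.foldl (pvStepA adj k) (nxt, vis, out)).2.2 := by
  intro f
  induction f with
  | nil => intro nxt vis out; simp
  | cons ct f ih =>
    intro nxt vis out
    rw [List.cons_append, pvLoopA]
    rw [pvPush_shift ct.2 (adj.getD ct.1 []) f nxt vis]
    rw [ih (pvPushA ct.2 (nxt, vis) (adj.getD ct.1 [])).1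
        (pvPushA ct.2 (nxt, vis) (adj.getD ct.1 [])).2
        (if ct.2 ≤ k ∧ ct.2 ≠ -1 then out ++ [ct.1] else out)]
    simp only [List.foldl_cons, pvStepA]

-- A measure bound for the whole level fold (A side)
theorem pvLevelA_measure (adj : PySem.Dict String (List (String × Int))) (k : Int) :
    ∀ (f nxt : List (String × Int)) (vis : PySem.Set String) (out : List String),
      2 * pvCnt adj (f.foldl (pvStepA adj k) (nxt, vis, out)).2.1 +
          (f.foldl (pvStepA adj k) (nxt, vis, out)).1.length ≤
        2 * pvCnt adj vis + nxt.length := by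
  intro f
  induction f with
  | nil => intro nxt vis out; simp
  | cons ct f ih =>
    intro nxt vis out
    simp only [List.foldl_cons, pvStepA]
    have hp := pvPush_measure adj ct.2 (adj.getD ct.1 [])
      (fun p hp => pv_getD_mem_univ adj ct.1 p hp) nxt vis
    have h1 := ih (pvPushA ct.2 (nxt, vis) (adj.getD ct.1 [])).1
      (pvPushA ct.2 (nxt, vis) (adj.getD ct.1 [])).2
      (if ct.2 ≤ k ∧ ct.2 ≠ -1 then out ++ [ct.1] else out)
    omega

-- contains of a raw-pairs update
theorem pv_contains_update :
    ∀ (ps : List (String × Int)) (d : PySem.Dict String Int) (x : String),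
      (d.update ps).contains x = (d.contains x || ps.any (fun p => p.1 == x)) := by
  intro ps
  induction ps with
  | nil => intro d x; simp [PySem.Dict.update]
  | cons p ps ih =>
    intro d x
    have hstep : d.update (p :: ps) = (d.insert p.1 p.2).update ps := by
      simp only [PySem.Dict.update, List.foldl_cons]
    rw [hstep, ih, PySem.Dict.contains_insert]
    simp only [List.any_cons]
    by_cases hxe : x = p.1
    · subst hxe; simp
    · have e1 : (x == p.1) = false := by simpa using hxe
      have e2 : (p.1 == x) = false := by simpa using (Ne.symm hxe)
      simp [e1, e2]

-- contains as a scan over items (definitional)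
theorem pv_contains_eq_any (d : PySem.Dict String Int) (x : String) :
    d.contains x = d.items.any (fun p => p.1 == x) := rfl

-- update with fresh nodup keys appends the pairs
theorem pv_items_update_fresh (d : PySem.Dict String Int) (ps : List (String × Int))
    (hfresh : ∀ p ∈ ps, d.contains p.1 = false) (hnd : (ps.map Prod.fst).Nodup) :
    (d.update ps).items = d.items ++ ps := by
  have := PySem.Dict.items_foldl_insert_fresh (l := ps) (k := Prod.fst) (v := Prod.snd)
    (d := d) (fun a ha => hfresh a ha) hnd
  simpa [PySem.Dict.update] using this

-- A's in-level guard vs B's count predicate on frontier pairs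
theorem pv_filter_bridge (k : Int) :
    ∀ (l : List (String × Int)),
      (l.filter (fun ct => decide (ct.2 ≤ k ∧ ct.2 ≠ -1))).length =
        pvCountD k (l.map Prod.snd) := by
  intro l
  induction l with
  | nil => simp [pvCountD]
  | cons ct l ih =>
    by_cases h1 : ct.2 = -1
    · simp [pvCountD, h1] at ih ⊢; omega
    · by_cases h2 : ct.2 ≤ k
      · simp [pvCountD, h1, h2] at ih ⊢; omega
      · simp [pvCountD, h1, h2] at ih ⊢; omega

-- within a level: A's push over a city's neighbours matches B's dict writes
theorem pvPushInner (times : PySem.Dict String Int) (t : Int) :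
    ∀ (nbrs : List (String × Int)) (nxt : List (String × Int)) (vis : PySem.Set String)
      (f : PySem.Dict String Int),
      nxt = f.items →
      (∀ x, x ∈ vis ↔ (times.contains x || f.contains x) = true) →
      (pvPushA t (nxt, vis) nbrs).1 = (pvInnerB times t f nbrs).items ∧
      (∀ x, x ∈ (pvPushA t (nxt, vis) nbrs).2 ↔
        (times.contains x || (pvInnerB times t f nbrs).contains x) = true) := by
  intro nbrs
  induction nbrs with
  | nil => intro nxt vis f h1 h2; exact ⟨h1, h2⟩
  | cons nw nbrs ih =>
    intro nxt vis f h1 h2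
    have hstepA : pvPushA t (nxt, vis) (nw :: nbrs) =
        pvPushA t (if nw.1 ∈ vis then (nxt, vis)
                   else (nxt ++ [(nw.1, t + nw.2 + 1)], PySem.Set.add vis nw.1)) nbrs := by
      simp only [pvPushA, List.foldl_cons]
    have hstepB : pvInnerB times t f (nw :: nbrs) =
        pvInnerB times t (if times.contains nw.1 || f.contains nw.1 then f
                          else f.insert nw.1 (t + nw.2 + 1)) nbrs := by
      simp only [pvInnerB, List.foldl_cons]
    by_cases hmem : nw.1 ∈ vis
    · have hc : (times.contains nw.1 || f.contains nw.1) = true := (h2 nw.1).mp hmem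
      rw [hstepA, hstepB, if_pos hmem, if_pos hc]
      exact ih nxt vis f h1 h2
    · have hc : (times.contains nw.1 || f.contains nw.1) = false := by
        cases h : (times.contains nw.1 || f.contains nw.1)
        · rfl
        · exact absurd ((h2 nw.1).mpr h) hmem
      have hfs : f.contains nw.1 = false := by
        cases h : f.contains nw.1
        · rfl
        · simp [h] at hc
      rw [hstepA, hstepB, if_neg hmem, if_neg (by simp [hc])]
      apply ih
      · rw [h1, PySem.Dict.items_insert_of_not_contains f _ hfs]
      · intro x
        rw [PySem.Set.mem_add, PySem.Dict.contains_insert]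
        constructor
        · rintro (hx | rfl)
          · have := (h2 x).mp hx
            cases ht : times.contains x <;> cases hf : f.contains x <;>
              simp [ht, hf] at this ⊢
          · simp
        · intro hx
          cases ht : times.contains x with
          | true => exact Or.inl ((h2 x).mpr (by simp [ht]))
          | false =>
            rw [ht] at hx
            simp only [Bool.false_or] at hx
            cases hbe : (x == nw.1) with
            | true => exact Or.inr (by simpa using hbe)
            | false =>
              rw [hbe] at hx
              simp only [Bool.false_or] at hx
              exact Or.inl ((h2 x).mpr (by simp [ht, hx]))

-- whole level: A's fold over the frontier matches B's discovery-dict fold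
theorem pvRelLevel (adj : PySem.Dict String (List (String × Int))) (k : Int)
    (times : PySem.Dict String Int) :
    ∀ (lpairs : List (String × Int)) (nxt : List (String × Int)) (vis : PySem.Set String)
      (out : List String) (f : PySem.Dict String Int),
      nxt = f.items →
      (∀ x, x ∈ vis ↔ (times.contains x || f.contains x) = true) →
      (lpairs.foldl (pvStepA adj k) (nxt, vis, out)).1 =
          (lpairs.foldl (fun f ct => pvInnerB times ct.2 f (adj.getD ct.1 [])) f).items ∧
      (∀ x, x ∈ (lpairs.foldl (pvStepA adj k) (nxt, vis, out)).2.1 ↔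
          (times.contains x ||
            (lpairs.foldl (fun f ct => pvInnerB times ct.2 f (adj.getD ct.1 [])) f).contains x) = true) ∧
      (lpairs.foldl (pvStepA adj k) (nxt, vis, out)).2.2.length =
          out.length + (lpairs.filter (fun ct => decide (ct.2 ≤ k ∧ ct.2 ≠ -1))).length := by
  intro lpairs
  induction lpairs with
  | nil => intro nxt vis out f h1 h2; exact ⟨h1, h2, by simp⟩
  | cons ct lpairs ih =>
    intro nxt vis out f h1 h2
    simp only [List.foldl_cons, pvStepA]
    obtain ⟨g1, g2⟩ := pvPushInner times ct.2 (adj.getD ct.1 []) nxt vis f h1 h2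
    have := ih (pvPushA ct.2 (nxt, vis) (adj.getD ct.1 [])).1
      (pvPushA ct.2 (nxt, vis) (adj.getD ct.1 [])).2
      (if ct.2 ≤ k ∧ ct.2 ≠ -1 then out ++ [ct.1] else out)
      (pvInnerB times ct.2 f (adj.getD ct.1 [])) g1 g2
    refine ⟨this.1, this.2.1, ?_⟩
    rw [this.2.2]
    by_cases hp : ct.2 ≤ k ∧ ct.2 ≠ -1
    · simp [hp]; omega
    · simp [hp]

-- fuel-indexed main lemma: A's queue loop counts what B's dict loop records
theorem pvMainB (adj : PySem.Dict String (List (String × Int))) (k : Int) :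
    ∀ (N : Nat) (q : List (String × Int)) (vis : PySem.Set String) (out : List String)
      (times level : PySem.Dict String Int),
      2 * pvCnt adj vis + q.length < N →
      q = level.items →
      (∀ x, x ∈ vis ↔ times.contains x = true) →
      out.length + pvCountD k level.values = pvCountD k times.values →
      (pvLoopA adj k q vis out).length = pvCountD k (pvLoopB adj times level).values := by
  intro N
  induction N with
  | zero => intro q vis out times level h; omega
  | succ N ih =>
    intro q vis out times level hm hq hvis hcnt
    cases hqc : q with
    | nil =>
      subst hqc
      rw [pvLoopA, pvLoopB]
      have hempty : level.items.isEmpty = true := by rw [← hq]; rfl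
      rw [if_pos hempty]
      have hlv : level.values = [] := by
        have : level.items = [] := by rw [← hq]
        simp [PySem.Dict.values, this]
      rw [hlv] at hcnt
      simpa [pvCountD] using hcnt
    | cons hd tl =>
      subst hqc
      have hempty : level.items.isEmpty = false := by
        rw [← hq]; rfl
      rw [pvLoopB, if_neg (by simp [hempty])]
      have hA : pvLoopA adj k (hd :: tl) vis out =
          pvLoopA adj k ((hd :: tl).foldl (pvStepA adj k) ([], vis, out)).1
            ((hd :: tl).foldl (pvStepA adj k) ([], vis, out)).2.1
            ((hd :: tl).foldl (pvStepA adj k) ([], vis, out)).2.2 := by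
        have := pvLevelA adj k (hd :: tl) [] vis out
        simpa using this
      rw [hA]
      have h2' : ∀ x, x ∈ vis ↔ (times.contains x || (PySem.Dict.empty (κ := String) (ν := Int)).contains x) = true := by
        intro x
        simp [PySem.Dict.contains_empty, hvis x]
      obtain ⟨g1, g2, g3⟩ := pvRelLevel adj k times (hd :: tl) [] vis out PySem.Dict.empty rfl h2'
      have hfold : ((hd :: tl).foldl (fun f ct => pvInnerB times ct.2 f (adj.getD ct.1 [])) PySem.Dict.empty) = pvLevelB adj times level.items := by
        rw [← hq]; rfl
      rw [hfold] at g1 g2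
      -- found's freshness / nodup keys
      have hinv := pvFound_inv adj times level.items
      have hkeys : ((pvLevelB adj times level.items).items.map Prod.fst).Nodup := by
        have := hinv.2
        simpa [PySem.Dict.keys] using this
      have hfresh : ∀ p ∈ (pvLevelB adj times level.items).items, times.contains p.1 = false :=
        fun p hp => (hinv.1 p hp).2
      -- invariants for the recursive call
      apply ih
      · -- measure
        have hml := pvLevelA_measure adj k (hd :: tl) [] vis out
        simp only [List.length_nil] at hml
        simp only [List.length_cons] at hm
        omega
      · exact g1.symm ▸ rfl
      · -- visited ↔ updated times
        intro x
        rw [g2 x, pv_contains_update]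
        have : (pvLevelB adj times level.items).contains x =
            (pvLevelB adj times level.items).items.any (fun p => p.1 == x) :=
          pv_contains_eq_any _ x
        rw [this]
      · -- counting invariant
        have hupd : (times.update (pvLevelB adj times level.items).items).items =
            times.items ++ (pvLevelB adj times level.items).items :=
          pv_items_update_fresh times _ hfresh hkeys
        have hvals : (times.update (pvLevelB adj times level.items).items).values =
            times.values ++ (pvLevelB adj times level.items).values := by
          simp [PySem.Dict.values, hupd]
        rw [hvals]
        have hout : ((hd :: tl).foldl (pvStepA adj k) ([], vis, out)).2.2.length =
            pvCountD k times.values := by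
          rw [g3, pv_filter_bridge k (hd :: tl)]
          have : (hd :: tl).map Prod.snd = level.values := by
            rw [hq]; rfl
          rw [this]
          omega
        rw [hout]
        simp [pvCountD, List.filter_append]

-- ===== VERDICT (by name: the statement is the Claim_ definition above) =====
theorem vacation_destinations_spec : Claim_equal_vacation_destinations := by
  intro destinations origin k _
  unfold Spec_vacation_destinations vacation_destinations vacation_destinations_alt
  have hB : pvBuildAdjB = pvBuildAdjA := rfl
  rw [hB]
  have h := pvMainB (pvBuildAdjA destinations) k
    (2 * pvCnt (pvBuildAdjA destinations) (PySem.Set.ofList [origin]) + 2)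
    [(origin, -1)] (PySem.Set.ofList [origin]) []
    (PySem.Dict.ofList [(origin, -1)]) (PySem.Dict.ofList [(origin, -1)])
    (by simp) rfl
    (by
      intro x
      have hitems : (PySem.Dict.ofList [(origin, (-1 : Int))]).items = [(origin, -1)] := rfl
      rw [pv_contains_eq_any, hitems]
      constructor
      · intro hx
        have hxo : x = origin := by simpa [PySem.Set.ofList, PySem.Set.add] using hx
        subst hxo
        simp
      · intro hx
        have hxo : origin = x := by simpa using hx
        simp [PySem.Set.ofList, PySem.Set.add, ← hxo])
    (by simp [pvCountD])
  simp only [pvCountD] at h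
  exact congrArg (fun n : Nat => (n : Int)) h
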